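-- pv_equiv track=rewrite | github.com/pypi-data/pypi-mirror-116 | packages/convo-new-version-abdo/convo_new_version_abdo-1.0.2-py3-none-any.whl/convo/utils/common.py | updating_existing_keys
-- ===== SOURCE A (Python) =====
-- from typing import Any, Coroutine, Dict, List, Optional, Text, Type, TypeVar
--
-- def updating_existing_keys(
--     original: Dict[Any, Any], updates: Dict[Any, Any]
-- ) -> Dict[Any, Any]:
--     """Iterate through all the updates and update a value in the original dictionary.
--
--     If the updates contain a key that is not present in the original dict, it will
--     be ignored."""
--
--     upgrade = original.copy()
--     for k, v in updates.items():
--         if k in upgrade: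
--             upgrade[k] = v
--     return upgrade
-- ===== SOURCE B (Python) =====
-- def updating_existing_keys(original, updates):
--     """Build the result directly from original: for each key of original, take the
--     value from updates when the key exists there, else keep the original value."""
--     return {k: updates[k] if k in updates else v for k, v in original.items()}
-- ===== Notes on version B (the rewrite author's own statement) =====
-- stated objective: simpler
-- what changed: Instead of copying original and looping over updates with a membership test into the copy, B builds the result in one dict comprehension over original.items(), probing membership in updates; iteration target and membership-tested container are swapped.
import Mathlib
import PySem

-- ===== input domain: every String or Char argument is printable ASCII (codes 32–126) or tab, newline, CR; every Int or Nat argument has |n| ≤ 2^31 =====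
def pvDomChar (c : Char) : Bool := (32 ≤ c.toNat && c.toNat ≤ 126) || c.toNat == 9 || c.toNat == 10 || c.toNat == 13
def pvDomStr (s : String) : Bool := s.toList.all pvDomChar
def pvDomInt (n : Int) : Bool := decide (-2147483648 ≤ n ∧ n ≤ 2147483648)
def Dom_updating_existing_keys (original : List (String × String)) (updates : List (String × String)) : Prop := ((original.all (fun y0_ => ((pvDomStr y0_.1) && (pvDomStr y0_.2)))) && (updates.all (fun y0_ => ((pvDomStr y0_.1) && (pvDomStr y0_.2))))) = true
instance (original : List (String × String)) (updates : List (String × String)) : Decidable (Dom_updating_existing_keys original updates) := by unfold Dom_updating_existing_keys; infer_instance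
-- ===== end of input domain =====

-- B replaces A's copy-then-update loop over `updates` by a single dict comprehension
-- over `original.items()` probing membership in `updates` (objective: simpler).


-- ===== PORT A =====
-- the dict arguments arrive as association lists; `PySem.Dict.ofList` is the dict they denote
def updating_existing_keys (original : List (String × String)) (updates : List (String × String)) : List (String × String) :=
  -- upgrade = original.copy(); for k, v in updates.items(): if k in upgrade: upgrade[k] = v
  ((PySem.Dict.ofList updates).items.foldl
      (fun (upgrade : PySem.Dict String String) kv =>
        if upgrade.contains kv.1 then upgrade.insert kv.1 kv.2 else upgrade)
      (PySem.Dict.ofList original)).items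

-- ===== PORT B =====
def updating_existing_keys_alt (original : List (String × String)) (updates : List (String × String)) : List (String × String) :=
  -- {k: updates[k] if k in updates else v for k, v in original.items()}
  -- (`updates[k] if k in updates else v` is exact as get?-with-default: d[k] succeeds iff k in d;
  --  the comprehension's keys come from a dict, hence distinct, so it is the map over original.items())
  let u := PySem.Dict.ofList updates
  (PySem.Dict.ofList original).items.map
    (fun kv => (kv.1, match u.get? kv.1 with | some w => w | none => kv.2))

-- ===== PRECONDITION & SPEC =====
def Spec_updating_existing_keys (original : List (String × String)) (updates : List (String × String)) (out : List (String × String)) : Prop := out = updating_existing_keys_alt original updates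
instance (original : List (String × String)) (updates : List (String × String)) (out : List (String × String)) : Decidable (Spec_updating_existing_keys original updates out) := by unfold Spec_updating_existing_keys; infer_instance

-- ===== CLAIM (what is proved, stated in full; the proofs are below) =====
def Claim_equal_updating_existing_keys : Prop := ∀ (original : List (String × String)) (updates : List (String × String)), Dom_updating_existing_keys original updates → Spec_updating_existing_keys original updates (updating_existing_keys original updates)

-- ===== LEMMAS AND PROOFS =====

-- A's loop, run over a key-distinct list `l` starting from a key-distinct dict `d`,
-- rewrites every item of `d` to the first match of its key in `l` (default: the old value).
theorem pv_foldl_update_items (l : List (String × String)) (d : PySem.Dict String String)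
    (hd : d.keys.Nodup) (hl : (l.map Prod.fst).Nodup) :
    (l.foldl (fun (u : PySem.Dict String String) kv =>
        if u.contains kv.1 then u.insert kv.1 kv.2 else u) d).items
      = d.items.map (fun kv =>
          (kv.1, ((l.find? (fun p => p.1 == kv.1)).map Prod.snd).getD kv.2)) := by
  induction l generalizing d with
  | nil => simp [List.find?]
  | cons hd' t ih =>
    obtain ⟨k, v⟩ := hd'
    simp only [List.map_cons, List.nodup_cons] at hl
    obtain ⟨hk, ht⟩ := hl
    have hfind : t.find? (fun q => q.1 == k) = none := by
      rw [List.find?_eq_none]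
      intro x hx hbe
      exact hk (by rw [← eq_of_beq hbe]; exact List.mem_map_of_mem hx)
    cases hc : d.contains k with
    | true =>
      simp only [List.foldl_cons, hc, if_true]
      rw [ih (d.insert k v) (PySem.Dict.nodup_keys_insert d k v hd) ht]
      rw [PySem.Dict.items_insert_of_contains d v hc, List.map_map]
      apply List.map_congr_left
      intro p _
      by_cases hpk : (p.1 == k) = true
      · have hpk' : p.1 = k := eq_of_beq hpk
        simp [Function.comp, hpk, List.find?, hpk', hfind]
      · have hne : (k == p.1) = false := by
          apply beq_eq_false_iff_ne.mpr
          intro h; exact hpk (by simp [h])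
        simp [Function.comp, hpk, List.find?, hne]
    | false =>
      simp only [List.foldl_cons, hc, Bool.false_eq_true, if_false]
      rw [ih d hd ht]
      apply List.map_congr_left
      intro p hp
      have hne : (k == p.1) = false := by
        apply beq_eq_false_iff_ne.mpr
        intro h
        have : d.contains k = true := by
          rw [PySem.Dict.contains_iff_mem_keys, h]
          exact List.mem_map_of_mem hp
        simp [hc] at this
      simp [List.find?, hne]

-- ===== VERDICT (by name: the statement is the Claim_ definition above) =====
theorem updating_existing_keys_spec : Claim_equal_updating_existing_keys := by
  intro original updates _
  unfold Spec_updating_existing_keys updating_existing_keys updating_existing_keys_alt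
  rw [pv_foldl_update_items (PySem.Dict.ofList updates).items (PySem.Dict.ofList original)
        (PySem.Dict.nodup_keys_ofList original) (PySem.Dict.nodup_keys_ofList updates)]
  apply List.map_congr_left
  intro kv _
  simp only [PySem.Dict.get?]
  cases (PySem.Dict.ofList updates).items.find? (fun p => p.1 == kv.1) <;> simp
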